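-- pv_equiv track=rewrite | github.com/ashraywinash/vnr-ace-backend | agents/classwork/report_generation/utils.py | validate_filter_columns_against_datasets
-- ===== SOURCE A (Python) =====
-- from typing import Any, Dict, List, Optional, Tuple
--
-- def validate_filter_columns_against_datasets(
--     filters: Dict[str, Any],
--     dataset_names: List[str],
--     dataset_allowed_columns: Dict[str, set],
-- ) -> List[str]:
--     allowed_union = set()
--     for ds in dataset_names:
--         allowed_union.update(dataset_allowed_columns.get(ds, set()))
--
--     invalid = [key for key in filters.keys() if key not in allowed_union]
--     return invalid
-- ===== SOURCE B (Python) =====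
-- def validate_filter_columns_against_datasets(filters, dataset_names, dataset_allowed_columns):
--     empty = set()
--     return [
--         key
--         for key in filters.keys()
--         if not any(key in dataset_allowed_columns.get(ds, empty) for ds in dataset_names)
--     ]
-- ===== Notes on version B (the rewrite author's own statement) =====
-- stated objective: simpler
-- what changed: B drops the precomputed union set entirely and instead decides each filter key by a lazy any() scan over the datasets' own column sets, so no index is built or maintained.
import Mathlib
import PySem

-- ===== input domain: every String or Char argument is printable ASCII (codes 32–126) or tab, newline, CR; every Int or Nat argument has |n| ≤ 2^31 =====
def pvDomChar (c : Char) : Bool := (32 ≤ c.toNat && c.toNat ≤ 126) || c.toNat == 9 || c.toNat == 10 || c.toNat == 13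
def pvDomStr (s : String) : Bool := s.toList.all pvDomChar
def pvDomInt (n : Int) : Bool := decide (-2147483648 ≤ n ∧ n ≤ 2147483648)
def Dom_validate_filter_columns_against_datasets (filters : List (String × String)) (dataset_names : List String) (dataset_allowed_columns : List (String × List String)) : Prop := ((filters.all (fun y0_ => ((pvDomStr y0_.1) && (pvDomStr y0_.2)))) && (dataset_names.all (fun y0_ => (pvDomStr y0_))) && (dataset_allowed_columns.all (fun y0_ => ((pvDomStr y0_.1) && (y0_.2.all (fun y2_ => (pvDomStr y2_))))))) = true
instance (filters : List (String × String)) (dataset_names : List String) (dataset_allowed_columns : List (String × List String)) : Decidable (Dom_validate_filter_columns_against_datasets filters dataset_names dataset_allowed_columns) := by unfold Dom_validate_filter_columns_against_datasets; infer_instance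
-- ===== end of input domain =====

-- B drops A's precomputed union set and decides each filter key by a lazy any-scan over the datasets' column sets (objective: simpler).
-- ===== PORT A =====
def validate_filter_columns_against_datasets (filters : List (String × String)) (dataset_names : List String) (dataset_allowed_columns : List (String × List String)) : List String :=
  -- allowed_union = set(); for ds in dataset_names: allowed_union.update(dataset_allowed_columns.get(ds, set()))
  let allowed_union : PySem.Set String :=
    dataset_names.foldl
      (fun acc ds => PySem.Set.update acc ((PySem.Dict.mk dataset_allowed_columns).getD ds []))
      PySem.Set.empty
  -- invalid = [key for key in filters.keys() if key not in allowed_union]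
  ((PySem.Dict.mk filters).keys).filter (fun key => !(PySem.Set.contains allowed_union key))

-- ===== PORT B =====
def validate_filter_columns_against_datasets_alt (filters : List (String × String)) (dataset_names : List String) (dataset_allowed_columns : List (String × List String)) : List String :=
  -- [key for key in filters.keys() if not any(key in dataset_allowed_columns.get(ds, empty) for ds in dataset_names)]
  ((PySem.Dict.mk filters).keys).filter (fun key =>
    !(dataset_names.any (fun ds =>
        PySem.Set.contains ((PySem.Dict.mk dataset_allowed_columns).getD ds []) key)))

-- ===== PRECONDITION & SPEC =====
def Spec_validate_filter_columns_against_datasets (filters : List (String × String)) (dataset_names : List String) (dataset_allowed_columns : List (String × List String)) (out : List String) : Prop := out = validate_filter_columns_against_datasets_alt filters dataset_names dataset_allowed_columns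
instance (filters : List (String × String)) (dataset_names : List String) (dataset_allowed_columns : List (String × List String)) (out : List String) : Decidable (Spec_validate_filter_columns_against_datasets filters dataset_names dataset_allowed_columns out) := by unfold Spec_validate_filter_columns_against_datasets; infer_instance

-- ===== CLAIM (what is proved, stated in full; the proofs are below) =====
def Claim_equal_validate_filter_columns_against_datasets : Prop := ∀ (filters : List (String × String)) (dataset_names : List String) (dataset_allowed_columns : List (String × List String)), Dom_validate_filter_columns_against_datasets filters dataset_names dataset_allowed_columns → Spec_validate_filter_columns_against_datasets filters dataset_names dataset_allowed_columns (validate_filter_columns_against_datasets filters dataset_names dataset_allowed_columns)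

-- ===== LEMMAS AND PROOFS =====

-- Membership in A's accumulated union set equals B's lazy any-scan, for any starting accumulator.
theorem pv_union_contains (dataset_names : List String) (dac : List (String × List String)) (acc : PySem.Set String) (key : String) :
    PySem.Set.contains
      (dataset_names.foldl (fun acc ds => PySem.Set.update acc ((PySem.Dict.mk dac).getD ds [])) acc) key
    = (acc.contains key ||
        dataset_names.any (fun ds => PySem.Set.contains ((PySem.Dict.mk dac).getD ds []) key)) := by
  induction dataset_names generalizing acc with
  | nil => simp
  | cons ds rest ih =>
    simp only [List.foldl_cons, List.any_cons, ih]
    have : (PySem.Set.update acc ((PySem.Dict.mk dac).getD ds [])).contains key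
        = (acc.contains key || PySem.Set.contains ((PySem.Dict.mk dac).getD ds []) key) := by
      simp [PySem.Set.contains_eq_listContains, List.contains_eq_mem, PySem.Set.mem_update]
    rw [this, Bool.or_assoc]

-- ===== VERDICT =====
theorem validate_filter_columns_against_datasets_spec : Claim_equal_validate_filter_columns_against_datasets := by
  intro filters dataset_names dataset_allowed_columns _
  unfold Spec_validate_filter_columns_against_datasets
  unfold validate_filter_columns_against_datasets validate_filter_columns_against_datasets_alt
  simp only [pv_union_contains]
  rfl
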